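-- pv_equiv track=rewrite | github.com/tomdif/jt-gravity-from-convex-subsets | scripts/14_rfam_gamma.py | count_cc_containment
-- ===== SOURCE A (Python) =====
-- def count_cc_containment(pairs):
--     """Exact CC count on the containment poset of base pairs.
--     Pair (i,j) ≤ pair (k,l) if k ≤ i and j ≤ l (i,j nested inside k,l)."""
--     m = len(pairs)
--     if m > 22 or m == 0: return None, None
--
--     le = [[False]*m for _ in range(m)]
--     for a in range(m):
--         for b in range(m):
--             ia, ja = pairs[a]
--             ib, jb = pairs[b]
--             le[a][b] = (ib <= ia and ja <= jb)
--
--     cc = 0; ints = 0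
--     for bits in range(1 << m):
--         S = [k for k in range(m) if bits & (1 << k)]
--         convex = True
--         for a in S:
--             if not convex: break
--             for b in S:
--                 if not convex: break
--                 if le[a][b]:
--                     for c in range(m):
--                         if le[a][c] and le[c][b] and not (bits & (1 << c)):
--                             convex = False; break
--         if convex:
--             cc += 1
--             if len(S) <= 1:
--                 ints += 1
--             else:
--                 is_int = False
--                 for a in S:
--                     for b in S:
--                         if le[a][b]:
--                             iv = {c for c in range(m) if le[a][c] and le[c][b]}
--                             if iv == set(S): is_int = True; break
--                     if is_int: break
--                 if is_int: ints += 1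
--     return cc, ints
-- ===== SOURCE B (Python) =====
-- def count_cc_containment(pairs):
--     """Same counts via precomputed closed-interval bitmasks: a subset (as a
--     bitmask) is convex iff the union of the interval masks of its comparable
--     pairs equals the subset, and an interval iff some single mask equals it."""
--     m = len(pairs)
--     if m == 0 or m > 22:
--         return None, None
--     rel = []  # (a, b, mask): le(a,b) holds; mask = closed interval [a,b]
--     for a in range(m):
--         ia, ja = pairs[a]
--         for b in range(m):
--             ib, jb = pairs[b]
--             if ib <= ia and ja <= jb:
--                 mask = 0
--                 for c in range(m):
--                     ic, jc = pairs[c]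
--                     if (ic <= ia and ja <= jc) and (ib <= ic and jc <= jb):
--                         mask |= 1 << c
--                 rel.append((a, b, mask))
--     cc = 0
--     ints = 0
--     for bits in range(1 << m):
--         closure = 0
--         for a, b, mask in rel:
--             if bits >> a & 1 and bits >> b & 1:
--                 closure |= mask
--         if closure == bits:
--             cc += 1
--             sz = sum(1 for k in range(m) if bits >> k & 1)
--             if sz <= 1 or any(mask == bits for a, b, mask in rel
--                               if bits >> a & 1 and bits >> b & 1):
--                 ints += 1
--     return cc, ints
-- ===== Notes on version B (the rewrite author's own statement) =====
-- stated objective: alternative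
-- what changed: Replaces A's per-subset triple nested early-exit scans (and set comparison) by precomputed closed-interval bitmasks: a subset is convex iff the OR of the masks of its comparable member pairs equals the subset's bitmask, and an interval iff one single mask equals it.
import Mathlib
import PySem

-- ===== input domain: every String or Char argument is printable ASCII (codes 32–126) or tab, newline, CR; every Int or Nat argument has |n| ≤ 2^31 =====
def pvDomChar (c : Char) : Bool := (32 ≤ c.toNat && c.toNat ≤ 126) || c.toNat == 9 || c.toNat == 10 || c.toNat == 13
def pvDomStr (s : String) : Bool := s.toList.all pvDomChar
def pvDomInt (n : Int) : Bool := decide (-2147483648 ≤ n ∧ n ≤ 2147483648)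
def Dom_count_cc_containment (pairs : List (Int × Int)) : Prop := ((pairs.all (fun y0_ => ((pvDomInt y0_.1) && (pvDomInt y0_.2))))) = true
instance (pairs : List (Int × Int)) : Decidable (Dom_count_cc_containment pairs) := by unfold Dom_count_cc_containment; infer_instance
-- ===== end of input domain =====

-- B replaces A's per-subset triple nested early-exit scans by precomputed closed-interval
-- bitmasks: a subset is convex iff the OR of the masks of its comparable member pairs equals
-- the subset, and an interval iff one single mask equals it (objective: alternative algorithm).

-- ===== PORT A =====
-- A's le matrix entry (i_b ≤ i_a and j_a ≤ j_b), ported as a function of the two indices.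
def pvLeA (pairs : List (Int × Int)) (a b : Nat) : Bool :=
  decide ((pairs.getD b ((0:Int),(0:Int))).1 ≤ (pairs.getD a ((0:Int),(0:Int))).1 ∧
          (pairs.getD a ((0:Int),(0:Int))).2 ≤ (pairs.getD b ((0:Int),(0:Int))).2)

-- A's body for one value of bits (break-on-false loops are the all/any they compute)
def pvStepA (pairs : List (Int × Int)) (m : Nat) (acc : Int × Int) (bits : Nat) : Int × Int :=
  let S := (List.range m).filter (fun k => bits &&& (1 <<< k) != 0)
  let convex := S.all (fun a => S.all (fun b =>
    !pvLeA pairs a b || (List.range m).all (fun c =>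
      !(pvLeA pairs a c && pvLeA pairs c b && (bits &&& (1 <<< c) == 0)))))
  if convex then
    let ints :=
      if S.length ≤ 1 then acc.2 + 1
      else
        let isInt := S.any (fun a => S.any (fun b =>
          pvLeA pairs a b &&
            (let iv := (List.range m).filter (fun c => pvLeA pairs a c && pvLeA pairs c b)
             iv.all (fun c => S.contains c) && S.all (fun c => iv.contains c))))
        if isInt then acc.2 + 1 else acc.2
    (acc.1 + 1, ints)
  else acc

def count_cc_containment (pairs : List (Int × Int)) : Option Int × Option Int :=
  if pairs.length > 22 ∨ pairs.length = 0 then (none, none)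
  else
    (some ((List.range (2 ^ pairs.length)).foldl (pvStepA pairs pairs.length) ((0:Int), (0:Int))).1,
     some ((List.range (2 ^ pairs.length)).foldl (pvStepA pairs pairs.length) ((0:Int), (0:Int))).2)

-- ===== PORT B =====
-- bitmask of the closed interval [a,b] of the containment order
def pvMaskB (pairs : List (Int × Int)) (m a b : Nat) : Nat :=
  (List.range m).foldl (fun mask c =>
    if ((pairs.getD c ((0:Int),(0:Int))).1 ≤ (pairs.getD a ((0:Int),(0:Int))).1 ∧
          (pairs.getD a ((0:Int),(0:Int))).2 ≤ (pairs.getD c ((0:Int),(0:Int))).2) ∧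
       ((pairs.getD b ((0:Int),(0:Int))).1 ≤ (pairs.getD c ((0:Int),(0:Int))).1 ∧
          (pairs.getD c ((0:Int),(0:Int))).2 ≤ (pairs.getD b ((0:Int),(0:Int))).2)
    then mask ||| (1 <<< c) else mask) 0

-- the comparable ordered index pairs together with their interval masks
def pvRelB (pairs : List (Int × Int)) (m : Nat) : List (Nat × Nat × Nat) :=
  (List.range m).flatMap (fun a =>
    (List.range m).filterMap (fun b =>
      if (pairs.getD b ((0:Int),(0:Int))).1 ≤ (pairs.getD a ((0:Int),(0:Int))).1 ∧
         (pairs.getD a ((0:Int),(0:Int))).2 ≤ (pairs.getD b ((0:Int),(0:Int))).2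
      then some (a, b, pvMaskB pairs m a b) else none))

def pvStepB (pairs : List (Int × Int)) (m : Nat) (rel : List (Nat × Nat × Nat))
    (acc : Int × Int) (bits : Nat) : Int × Int :=
  let closure := rel.foldl (fun cl t =>
    if ((bits >>> t.1) &&& 1 == 1) && ((bits >>> t.2.1) &&& 1 == 1)
    then cl ||| t.2.2 else cl) 0
  if closure == bits then
    let sz := (List.range m).countP (fun k => (bits >>> k) &&& 1 == 1)
    if sz ≤ 1 || rel.any (fun t =>
        ((bits >>> t.1) &&& 1 == 1) && ((bits >>> t.2.1) &&& 1 == 1) && t.2.2 == bits)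
    then (acc.1 + 1, acc.2 + 1)
    else (acc.1 + 1, acc.2)
  else acc

def count_cc_containment_alt (pairs : List (Int × Int)) : Option Int × Option Int :=
  if pairs.length = 0 ∨ pairs.length > 22 then (none, none)
  else
    (some ((List.range (2 ^ pairs.length)).foldl
        (pvStepB pairs pairs.length (pvRelB pairs pairs.length)) ((0:Int), (0:Int))).1,
     some ((List.range (2 ^ pairs.length)).foldl
        (pvStepB pairs pairs.length (pvRelB pairs pairs.length)) ((0:Int), (0:Int))).2)

-- ===== PRECONDITION & SPEC =====
def Spec_count_cc_containment (pairs : List (Int × Int)) (out : Option Int × Option Int) : Prop := out = count_cc_containment_alt pairs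
instance (pairs : List (Int × Int)) (out : Option Int × Option Int) : Decidable (Spec_count_cc_containment pairs out) := by unfold Spec_count_cc_containment; infer_instance

-- ===== CLAIM (what is proved, stated in full; the proofs are below) =====
def Claim_equal_count_cc_containment : Prop := ∀ (pairs : List (Int × Int)), Dom_count_cc_containment pairs → Spec_count_cc_containment pairs (count_cc_containment pairs)

-- ===== LEMMAS AND PROOFS =====

lemma pvLeA_refl (pairs : List (Int × Int)) (a : Nat) : pvLeA pairs a a = true := by
  simp [pvLeA]

-- the two bit tests used by the ports both equal Nat.testBit
lemma bitShift_eq (bits k : Nat) : ((bits >>> k) &&& 1 == 1) = bits.testBit k := by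
  have h := Nat.mod_two_eq_zero_or_one (bits >>> k)
  simp only [Nat.testBit, Nat.and_one_is_mod, Nat.one_and_eq_mod_two]
  rcases h with h | h <;> simp [h]

lemma bitAnd_ne (bits k : Nat) : (bits &&& (1 <<< k) != 0) = bits.testBit k := by
  rw [Nat.one_shiftLeft, Nat.and_two_pow]
  cases h : bits.testBit k
  · simp
  · simp [bne_iff_ne]

lemma bitAnd_eq (bits k : Nat) : (bits &&& (1 <<< k) == 0) = !bits.testBit k := by
  rw [Nat.one_shiftLeft, Nat.and_two_pow]
  cases h : bits.testBit k
  · simp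
  · simp

lemma testBit_foldl_or (l : List Nat) (q : Nat → Prop) [DecidablePred q] (init d : Nat) :
    (l.foldl (fun mask c => if q c then mask ||| (1 <<< c) else mask) init).testBit d
      = (init.testBit d || l.any (fun c => decide (q c) && decide (c = d))) := by
  induction l generalizing init with
  | nil => simp
  | cons x xs ih =>
    simp only [List.foldl_cons, List.any_cons, ih]
    by_cases h : q x
    · simp [h, Nat.testBit_or, Nat.one_shiftLeft, Nat.testBit_two_pow, Bool.or_assoc, eq_comm]
    · simp [h]

lemma testBit_foldl_orT (l : List (Nat × Nat × Nat)) (p : Nat × Nat × Nat → Bool) (init d : Nat) :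
    (l.foldl (fun cl t => if p t then cl ||| t.2.2 else cl) init).testBit d
      = (init.testBit d || l.any (fun t => p t && t.2.2.testBit d)) := by
  induction l generalizing init with
  | nil => simp
  | cons x xs ih =>
    simp only [List.foldl_cons, List.any_cons, ih]
    by_cases h : p x = true
    · simp [h, Nat.testBit_or, Bool.or_assoc]
    · simp [Bool.of_not_eq_true h]

lemma testBit_maskB (pairs : List (Int × Int)) (m a b d : Nat) :
    (pvMaskB pairs m a b).testBit d
      = (decide (d < m) && pvLeA pairs a d && pvLeA pairs d b) := by
  rw [Bool.eq_iff_iff]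
  simp only [pvMaskB, testBit_foldl_or, Nat.zero_testBit, Bool.false_or, List.any_eq_true,
    List.mem_range, pvLeA, Bool.and_eq_true, decide_eq_true_eq]
  constructor
  · rintro ⟨c, hc, h1, h2⟩
    subst h2
    exact ⟨⟨hc, h1.1⟩, h1.2⟩
  · rintro ⟨⟨hd, h1⟩, h2⟩
    exact ⟨d, hd, ⟨h1, h2⟩, rfl⟩

lemma mem_relB (pairs : List (Int × Int)) (m : Nat) (t : Nat × Nat × Nat) :
    t ∈ pvRelB pairs m ↔
      t.1 < m ∧ t.2.1 < m ∧ pvLeA pairs t.1 t.2.1 = true ∧ t.2.2 = pvMaskB pairs m t.1 t.2.1 := by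
  obtain ⟨a, b, w⟩ := t
  simp only [pvRelB, List.mem_flatMap, List.mem_filterMap, List.mem_range,
    Option.ite_some_none_eq_some, pvLeA, decide_eq_true_eq]
  constructor
  · rintro ⟨a', ha', b', hb', hle, h⟩
    obtain ⟨h1, h2, h3⟩ := Prod.mk.injEq .. ▸ h
    · exact ⟨h1 ▸ ha', by simp_all, by simp_all, by simp_all⟩
  · rintro ⟨ha, hb, hle, hw⟩
    exact ⟨a, ha, b, hb, hle, by simp [hw]⟩

-- testBit above m is false for bits < 2^m
lemma testBit_high {bits m c : Nat} (hb : bits < 2 ^ m) (hc : ¬ c < m) : bits.testBit c = false :=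
  Nat.testBit_lt_two_pow (lt_of_lt_of_le hb (Nat.pow_le_pow_right (by norm_num) (by omega)))

-- the closure bitmask of B, characterised bit by bit
lemma testBit_closure (pairs : List (Int × Int)) (m bits d : Nat) :
    ((pvRelB pairs m).foldl (fun (cl : Nat) (t : Nat × Nat × Nat) =>
        if bits.testBit t.1 && bits.testBit t.2.1 then cl ||| t.2.2 else cl) 0).testBit d
      = ((pvRelB pairs m).any (fun t : Nat × Nat × Nat =>
          (bits.testBit t.1 && bits.testBit t.2.1) && t.2.2.testBit d)) := by
  rw [testBit_foldl_orT]
  simp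

-- A's convexity flag equals B's closure-equality test
lemma convex_eq_closure (pairs : List (Int × Int)) (m bits : Nat) (hb : bits < 2 ^ m) :
    (((List.range m).filter (fun k => bits.testBit k)).all (fun a =>
        ((List.range m).filter (fun k => bits.testBit k)).all (fun b =>
          !pvLeA pairs a b || (List.range m).all (fun c =>
            !(pvLeA pairs a c && pvLeA pairs c b && !bits.testBit c)))))
      = (((pvRelB pairs m).foldl (fun (cl : Nat) (t : Nat × Nat × Nat) =>
            if bits.testBit t.1 && bits.testBit t.2.1 then cl ||| t.2.2 else cl) 0) == bits) := by
  rw [Bool.eq_iff_iff, beq_iff_eq]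
  constructor
  · intro hconv
    have hconv' : ∀ a, a < m → bits.testBit a = true → ∀ b, b < m → bits.testBit b = true →
        pvLeA pairs a b = true → ∀ c, c < m → pvLeA pairs a c = true → pvLeA pairs c b = true →
        bits.testBit c = true := by
      intro a ha hPa b hb' hPb hle c hc h1 h2
      have h3 := List.all_eq_true.mp hconv a (List.mem_filter.mpr ⟨List.mem_range.mpr ha, hPa⟩)
      have h4 := List.all_eq_true.mp h3 b (List.mem_filter.mpr ⟨List.mem_range.mpr hb', hPb⟩)
      rw [Bool.or_eq_true] at h4
      rcases h4 with h4 | h4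
      · rw [hle] at h4; exact absurd h4 (by simp)
      · have h5 := List.all_eq_true.mp h4 c (List.mem_range.mpr hc)
        rw [h1, h2] at h5
        simpa using h5
    apply Nat.eq_of_testBit_eq
    intro d
    rw [testBit_closure, Bool.eq_iff_iff, List.any_eq_true]
    constructor
    · rintro ⟨t, htmem, hcov⟩
      rw [mem_relB] at htmem
      obtain ⟨ht1, ht2, htle, htm⟩ := htmem
      rw [Bool.and_eq_true, Bool.and_eq_true] at hcov
      obtain ⟨⟨hta, htb⟩, htd⟩ := hcov
      rw [htm, testBit_maskB, Bool.and_eq_true, Bool.and_eq_true, decide_eq_true_eq] at htd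
      exact hconv' t.1 ht1 hta t.2.1 ht2 htb htle d htd.1.1 htd.1.2 htd.2
    · intro hPd
      have hd : d < m := by
        by_contra hc
        rw [testBit_high hb hc] at hPd
        exact absurd hPd (by simp)
      exact ⟨(d, d, pvMaskB pairs m d d), (mem_relB pairs m _).mpr ⟨hd, hd, pvLeA_refl pairs d, rfl⟩,
        by simp [hPd, testBit_maskB, hd, pvLeA_refl]⟩
  · intro hcl
    rw [List.all_eq_true]
    intro a hamem
    rw [List.all_eq_true]
    intro b hbmem
    obtain ⟨ha, hPa⟩ := List.mem_filter.mp hamem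
    obtain ⟨hb', hPb⟩ := List.mem_filter.mp hbmem
    rw [List.mem_range] at ha hb'
    rw [Bool.or_eq_true]
    by_cases hle : pvLeA pairs a b = true
    · right
      rw [List.all_eq_true]
      intro c hcmem
      rw [List.mem_range] at hcmem
      by_cases h1 : pvLeA pairs a c = true
      · by_cases h2 : pvLeA pairs c b = true
        · have hcc : (((pvRelB pairs m).foldl (fun (cl : Nat) (t : Nat × Nat × Nat) =>
              if bits.testBit t.1 && bits.testBit t.2.1 then cl ||| t.2.2 else cl) 0)).testBit c = true := by
            rw [testBit_closure, List.any_eq_true]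
            exact ⟨(a, b, pvMaskB pairs m a b), (mem_relB pairs m _).mpr ⟨ha, hb', hle, rfl⟩,
              by simp [hPa, hPb, testBit_maskB, hcmem, h1, h2]⟩
          rw [hcl] at hcc
          simp [h1, h2, hcc]
        · simp [h2]
      · simp [h1]
    · simp [hle]

-- A's interval search equals B's single-mask-equality search
lemma int_eq (pairs : List (Int × Int)) (m bits : Nat) (hb : bits < 2 ^ m) :
    ((((List.range m).filter (fun k => bits.testBit k))).any (fun a =>
        (((List.range m).filter (fun k => bits.testBit k))).any (fun b =>
          pvLeA pairs a b &&
            (((List.range m).filter (fun c => pvLeA pairs a c && pvLeA pairs c b)).all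
                (fun c => ((List.range m).filter (fun k => bits.testBit k)).contains c) &&
             ((List.range m).filter (fun k => bits.testBit k)).all (fun c =>
                ((List.range m).filter (fun c => pvLeA pairs a c && pvLeA pairs c b)).contains c)))))
      = (pvRelB pairs m).any (fun t : Nat × Nat × Nat =>
          (bits.testBit t.1 && bits.testBit t.2.1) && t.2.2 == bits) := by
  rw [Bool.eq_iff_iff, List.any_eq_true, List.any_eq_true]
  constructor
  · rintro ⟨a, hamem, h⟩
    rw [List.any_eq_true] at h
    obtain ⟨b, hbmem, h⟩ := h
    rw [Bool.and_eq_true] at h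
    obtain ⟨hle, h⟩ := h
    rw [Bool.and_eq_true] at h
    obtain ⟨hsub, hsup⟩ := h
    obtain ⟨ha, hPa⟩ := List.mem_filter.mp hamem
    obtain ⟨hb', hPb⟩ := List.mem_filter.mp hbmem
    rw [List.mem_range] at ha hb'
    rw [List.all_eq_true] at hsub hsup
    have hmask : pvMaskB pairs m a b = bits := by
      apply Nat.eq_of_testBit_eq
      intro d
      rw [testBit_maskB]
      by_cases hd : d < m
      · rw [Bool.eq_iff_iff]
        simp only [hd, decide_true, Bool.true_and, Bool.and_eq_true]
        constructor
        · rintro ⟨h1, h2⟩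
          have hx := hsub d (List.mem_filter.mpr ⟨List.mem_range.mpr hd, by simp [h1, h2]⟩)
          rw [List.contains_eq_mem, decide_eq_true_eq, List.mem_filter] at hx
          exact hx.2
        · intro hPd
          have hx := hsup d (List.mem_filter.mpr ⟨List.mem_range.mpr hd, hPd⟩)
          rw [List.contains_eq_mem, decide_eq_true_eq, List.mem_filter] at hx
          have := hx.2
          rw [Bool.and_eq_true] at this
          exact this
      · rw [testBit_high hb hd]
        simp [hd]
    exact ⟨(a, b, pvMaskB pairs m a b), (mem_relB pairs m _).mpr ⟨ha, hb', hle, rfl⟩,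
      by simp [hPa, hPb, hmask]⟩
  · rintro ⟨t, htmem, h⟩
    rw [mem_relB] at htmem
    obtain ⟨ht1, ht2, htle, htm⟩ := htmem
    rw [Bool.and_eq_true, Bool.and_eq_true] at h
    obtain ⟨⟨hPa, hPb⟩, hmask'⟩ := h
    have hmask : pvMaskB pairs m t.1 t.2.1 = bits := by
      rw [← htm]; exact beq_iff_eq.mp hmask'
    refine ⟨t.1, List.mem_filter.mpr ⟨List.mem_range.mpr ht1, hPa⟩, ?_⟩
    rw [List.any_eq_true]
    refine ⟨t.2.1, List.mem_filter.mpr ⟨List.mem_range.mpr ht2, hPb⟩, ?_⟩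
    rw [Bool.and_eq_true]
    refine ⟨htle, ?_⟩
    rw [Bool.and_eq_true]
    constructor
    · rw [List.all_eq_true]
      intro c hcmem
      obtain ⟨hcr, hcp⟩ := List.mem_filter.mp hcmem
      rw [List.mem_range] at hcr
      rw [Bool.and_eq_true] at hcp
      have hcb : (pvMaskB pairs m t.1 t.2.1).testBit c = true := by
        rw [testBit_maskB]; simp [hcr, hcp.1, hcp.2]
      rw [hmask] at hcb
      rw [List.contains_eq_mem, decide_eq_true_eq]
      exact List.mem_filter.mpr ⟨List.mem_range.mpr hcr, hcb⟩
    · rw [List.all_eq_true]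
      intro c hcmem
      obtain ⟨hcr, hPc⟩ := List.mem_filter.mp hcmem
      rw [List.mem_range] at hcr
      have hcb : (pvMaskB pairs m t.1 t.2.1).testBit c = true := by rw [hmask]; exact hPc
      rw [testBit_maskB, Bool.and_eq_true, Bool.and_eq_true, decide_eq_true_eq] at hcb
      rw [List.contains_eq_mem, decide_eq_true_eq]
      exact List.mem_filter.mpr ⟨List.mem_range.mpr hcr, by simp [hcb.1.2, hcb.2]⟩

lemma pair_branch (L : Prop) [Decidable L] (i : Bool) (x y : Int) :
    ((x + 1, if L then y + 1 else if i = true then y + 1 else y) : Int × Int)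
      = if (decide L || i) = true then (x + 1, y + 1) else (x + 1, y) := by
  by_cases hL : L <;> cases i <;> simp [hL]

lemma step_eq (pairs : List (Int × Int)) (m : Nat) (acc : Int × Int) (bits : Nat)
    (hb : bits < 2 ^ m) :
    pvStepA pairs m acc bits = pvStepB pairs m (pvRelB pairs m) acc bits := by
  unfold pvStepA pvStepB
  simp only [bitAnd_ne, bitAnd_eq, bitShift_eq, List.countP_eq_length_filter]
  rw [convex_eq_closure pairs m bits hb, int_eq pairs m bits hb]
  refine if_congr Iff.rfl ?_ rfl
  exact pair_branch _ _ _ _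

-- ===== VERDICT (by name: the statement is the Claim_ definition above) =====
theorem count_cc_containment_spec : Claim_equal_count_cc_containment := by
  intro pairs _
  unfold Spec_count_cc_containment count_cc_containment count_cc_containment_alt
  by_cases h : pairs.length = 0 ∨ pairs.length > 22
  · rw [if_pos h.symm, if_pos h]
  · rw [if_neg (fun hc => h hc.symm), if_neg h]
    have : (List.range (2 ^ pairs.length)).foldl (pvStepA pairs pairs.length) ((0:Int), (0:Int))
         = (List.range (2 ^ pairs.length)).foldl
             (pvStepB pairs pairs.length (pvRelB pairs pairs.length)) ((0:Int), (0:Int)) := by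
      apply PySem.List.foldl_congr_mem
      intro acc bits hbits
      exact step_eq pairs pairs.length acc bits (List.mem_range.mp hbits)
    rw [this]
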